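-- pv_equiv track=rewrite | github.com/umutdundar99/GAN-Lightning | gan_lightning/src/models/generators/deepconv_generator.py | _calculate_kernel_stride
-- ===== SOURCE A (Python) =====
-- import math
--
-- def _calculate_kernel_stride(target_size, num_layers):
--
--     initial_size = 1
--     _kernel_size = []
--     _stride = []
--
--     for i in range(num_layers):
--         output_size = math.ceil((target_size - (initial_size - 1)) / 2)
--         stride = 2
--         kernel_size = target_size - (output_size - 1) * stride
--
--         _kernel_size.append(kernel_size)
--         target_size = output_size
--
--     return _kernel_size, _stride
-- ===== SOURCE B (Python) =====
-- def _calculate_kernel_stride(target_size, num_layers):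
--     # s(i) = ceil(target_size / 2**i), computed directly from the original argument
--     def s(i):
--         return -(-target_size >> i)
--     return [s(i) - (s(i + 1) - 1) * 2 for i in range(num_layers)], []
-- ===== Notes on version B (the rewrite author's own statement) =====
-- stated objective: simpler
-- what changed: Replaced A's stateful loop that repeatedly overwrites target_size with an independent per-index closed form: kernel_i = ceil(t/2^i) - (ceil(t/2^(i+1)) - 1)*2 computed directly from the original target_size in a comprehension (the empty _stride list is returned unchanged).
import Mathlib
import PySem

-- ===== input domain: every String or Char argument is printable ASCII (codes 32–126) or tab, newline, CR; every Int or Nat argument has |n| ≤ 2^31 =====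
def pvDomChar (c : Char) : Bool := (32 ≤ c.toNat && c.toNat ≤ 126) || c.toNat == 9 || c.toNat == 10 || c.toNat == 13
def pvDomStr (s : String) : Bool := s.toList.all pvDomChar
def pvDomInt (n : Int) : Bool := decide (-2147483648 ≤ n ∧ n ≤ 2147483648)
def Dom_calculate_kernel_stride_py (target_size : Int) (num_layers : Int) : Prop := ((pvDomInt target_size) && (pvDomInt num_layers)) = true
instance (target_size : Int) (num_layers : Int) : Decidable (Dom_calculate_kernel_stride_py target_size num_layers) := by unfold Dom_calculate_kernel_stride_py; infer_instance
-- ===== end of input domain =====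

-- B replaces A's stateful halving loop by an independent closed-form kernel per layer index (simpler, same cost).

-- ===== PORT A =====
-- math.ceil(x / 2) on these integers is the exact integer ceiling, ported as -((-x) // 2).
def calculate_kernel_stride_py (target_size : Int) (num_layers : Int) : List Int × List Int :=
  let initial_size : Int := 1
  let st :=
    (PySem.List.pyRange 0 num_layers 1).foldl
      (fun (st : Int × List Int) (_i : Int) =>
        let output_size := -(PySem.Int.floordiv (-(st.1 - (initial_size - 1))) 2)
        let stride : Int := 2
        let kernel_size := st.1 - (output_size - 1) * stride
        (output_size, st.2 ++ [kernel_size]))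
      (target_size, ([] : List Int))
  (st.2, [])

-- ===== PORT B =====
-- -(-t >> i) in Source B is the exact integer ceiling ceil(t / 2^i), ported as -((-t) // 2^i); i ≥ 0 in range(num_layers).
def calculate_kernel_stride_py_alt (target_size : Int) (num_layers : Int) : List Int × List Int :=
  let s : Int → Int := fun i => -(PySem.Int.floordiv (-target_size) (2 ^ i.toNat))
  ((PySem.List.pyRange 0 num_layers 1).map (fun i => s i - (s (i + 1) - 1) * 2), [])

-- ===== PRECONDITION & SPEC =====
def Spec_calculate_kernel_stride_py (target_size : Int) (num_layers : Int) (out : List Int × List Int) : Prop := out = calculate_kernel_stride_py_alt target_size num_layers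
instance (target_size : Int) (num_layers : Int) (out : List Int × List Int) : Decidable (Spec_calculate_kernel_stride_py target_size num_layers out) := by unfold Spec_calculate_kernel_stride_py; infer_instance

-- ===== CLAIM (what is proved, stated in full; the proofs are below) =====
def Claim_equal_calculate_kernel_stride_py : Prop := ∀ (target_size : Int) (num_layers : Int), Dom_calculate_kernel_stride_py target_size num_layers → Spec_calculate_kernel_stride_py target_size num_layers (calculate_kernel_stride_py target_size num_layers)

-- ===== LEMMAS AND PROOFS =====

-- ceil(t/2), the per-step size update of A
def cstep (t : Int) : Int := -(PySem.Int.floordiv (-t) 2)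
-- the kernel computed from a current size t
def gker (t : Int) : Int := t - (cstep t - 1) * 2
-- ceil(t / 2^k)
def siter (t : Int) (k : Nat) : Int := -(PySem.Int.floordiv (-t) (2 ^ k))
-- the kernel list A produces in n iterations starting from size t
def kit : Nat → Int → List Int
  | 0, _ => []
  | n + 1, t => gker t :: kit n (cstep t)

-- ceiling-division composition: ceil(ceil(t/a)/b) = ceil(t/(a*b)) for a,b > 0
theorem ceil_comp (t a b : Int) (ha : 0 < a) (hb : 0 < b) :
    -(PySem.Int.floordiv (-(-(PySem.Int.floordiv (-t) a))) b) = -(PySem.Int.floordiv (-t) (a * b)) := by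
  have hu : ( -(PySem.Int.floordiv (-t) a) - 1) * a < t ∧ t ≤ (-(PySem.Int.floordiv (-t) a)) * a :=
    (PySem.Int.neg_floordiv_neg_eq_iff_of_pos (a := t) (b := a) ha).mp rfl
  have hq : ( -(PySem.Int.floordiv (-t) (a * b)) - 1) * (a * b) < t ∧
      t ≤ (-(PySem.Int.floordiv (-t) (a * b))) * (a * b) :=
    (PySem.Int.neg_floordiv_neg_eq_iff_of_pos (a := t) (b := a * b) (by positivity)).mp rfl
  set u := -(PySem.Int.floordiv (-t) a) with hudef
  set q := -(PySem.Int.floordiv (-t) (a * b)) with hqdef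
  exact (PySem.Int.neg_floordiv_neg_eq_iff_of_pos (a := u) (b := b) hb).mpr
    ⟨by nlinarith [hu.1, hu.2, hq.1, hq.2], by nlinarith [hu.1, hu.2, hq.1, hq.2]⟩

theorem siter_zero (t : Int) : siter t 0 = t := by
  simp [siter, PySem.Int.floordiv]

theorem siter_succ (t : Int) (k : Nat) : siter t (k + 1) = cstep (siter t k) := by
  have h := ceil_comp t (2 ^ k) 2 (by positivity) (by norm_num)
  simp only [cstep, siter]
  rw [pow_succ]
  exact h.symm

theorem siter_cstep (t : Int) (k : Nat) : siter (cstep t) k = siter t (k + 1) := by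
  have h := ceil_comp t 2 (2 ^ k) (by norm_num) (by positivity)
  simp only [cstep, siter]
  rw [h, show (2 : Int) * 2 ^ k = 2 ^ (k + 1) from by rw [pow_succ]; ring]

-- the characterisation of A's fold
theorem foldA (l : List Int) (t : Int) (acc : List Int) :
    (l.foldl
      (fun (st : Int × List Int) (_i : Int) =>
        (-(PySem.Int.floordiv (-(st.1 - (1 - 1))) 2),
         st.2 ++ [st.1 - ((-(PySem.Int.floordiv (-(st.1 - (1 - 1))) 2)) - 1) * 2]))
      (t, acc)).2 = acc ++ kit l.length t := by
  induction l generalizing t acc with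
  | nil => simp [kit]
  | cons x xs ih =>
    simp only [List.foldl_cons, List.length_cons, kit]
    rw [ih]
    simp [cstep, gker]

-- A's kernel list equals the closed-form list
theorem kit_eq_map (N : Nat) (t : Int) :
    kit N t = (List.range N).map (fun k => gker (siter t k)) := by
  induction N generalizing t with
  | zero => simp [kit]
  | succ n ih =>
    rw [List.range_succ_eq_map]
    simp only [kit, List.map_cons, List.map_map, siter_zero]
    congr 1
    rw [ih]
    apply List.map_congr_left
    intro k _
    simp only [Function.comp]
    rw [siter_cstep]

theorem calculate_kernel_stride_py_spec : Claim_equal_calculate_kernel_stride_py := by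
  intro t n _
  unfold Spec_calculate_kernel_stride_py calculate_kernel_stride_py calculate_kernel_stride_py_alt
  simp only [PySem.List.pyRange_one]
  refine Prod.ext ?_ rfl
  show _ = _
  rw [foldA, List.length_map, List.length_range, List.nil_append, List.map_map,
    kit_eq_map]
  apply List.map_congr_left
  intro k hk
  simp only [Function.comp, zero_add, gker]
  have h1 : ((k : Int)).toNat = k := by simp
  have h2 : ((k : Int) + 1).toNat = k + 1 := by omega
  rw [h1, h2, ← siter_succ]
  simp [siter]

-- ===== VERDICT (by name: the statement is the Claim_ definition above) =====
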